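-- pv_equiv track=rewrite | github.com/zaiffishiekh01/Ledger-Lens-backend | Ledger-Lens/accounts/pdf_extractor.py | extract_rtl_transaction_description
-- ===== SOURCE A (Python) =====
-- def extract_rtl_transaction_description(search_lines, amounts, date_str):
--     """Extract and clean transaction description from search_lines"""
--     # Skip first 3 amount lines, then collect until date is found
--     amount_lines_skipped = 0
--     description_lines = []
--
--     for line in search_lines:
--         # Skip first 3 amount lines (lines containing SAR)
--         if 'SAR' in line and amount_lines_skipped < 3:
--             amount_lines_skipped += 1
--             continue
--
--         # After skipping 3 amount lines, collect everything until exact date is found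
--         if amount_lines_skipped >= 3:
--             if date_str in line:
--                 # Include the line with date_str and break
--                 description_lines.append(line)
--                 break
--             description_lines.append(line)
--
--     # Join lines with spaces only
--     description = ' '.join(line for line in description_lines if line.strip())
--
--     return description
-- ===== SOURCE B (Python) =====
-- def extract_rtl_transaction_description(search_lines, amounts, date_str):
--     """Extract and clean transaction description from search_lines"""
--     # Split point: the 3rd line containing 'SAR'; nothing to collect without it
--     sar_indices = [i for i, line in enumerate(search_lines) if 'SAR' in line]
--     if len(sar_indices) < 3:
--         return ''
--     # Collect everything after the split point up to and including the date line
--     collected = []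
--     for line in search_lines[sar_indices[2] + 1:]:
--         collected.append(line)
--         if date_str in line:
--             break
--     return ' '.join(line for line in collected if line.strip())
-- ===== Notes on version B (the rewrite author's own statement) =====
-- stated objective: alternative
-- what changed: Replaces A's single counter-driven two-phase loop with an explicit split-point decomposition: one pass collects the indices of 'SAR' lines, the slice after the 3rd such index is then walked until the date line (inclusive), and the non-blank lines are joined.
import Mathlib
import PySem

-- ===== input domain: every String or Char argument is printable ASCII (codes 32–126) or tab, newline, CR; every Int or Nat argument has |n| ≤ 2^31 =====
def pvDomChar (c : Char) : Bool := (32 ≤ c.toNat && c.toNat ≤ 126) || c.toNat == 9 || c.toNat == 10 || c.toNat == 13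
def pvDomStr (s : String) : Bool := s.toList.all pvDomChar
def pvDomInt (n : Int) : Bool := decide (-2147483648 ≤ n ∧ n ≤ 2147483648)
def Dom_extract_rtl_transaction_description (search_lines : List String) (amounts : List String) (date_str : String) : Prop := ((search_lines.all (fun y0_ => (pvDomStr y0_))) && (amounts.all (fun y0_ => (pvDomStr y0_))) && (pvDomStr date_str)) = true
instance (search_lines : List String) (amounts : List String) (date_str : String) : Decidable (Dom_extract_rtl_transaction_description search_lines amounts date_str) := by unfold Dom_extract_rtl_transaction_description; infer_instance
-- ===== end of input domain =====

-- B replaces A's counter-driven two-phase loop by an explicit split-point decomposition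
-- (indices of 'SAR' lines, slice after the 3rd, collect until the date line); objective: alternative.

-- ===== PORT A =====
-- ' '.join(line for line in ls if line.strip()) — shared final step of both Pythons
def pvJoinDesc (ls : List String) : String :=
  PySem.Str.join " " (ls.filter (fun l => PySem.Str.len (PySem.Str.strip l) != 0))

-- A's for-loop: state = (amount_lines_skipped, description_lines-accumulator reversed)
def pvALoop (date_str : String) : List String → Nat → List String → List String
  | [], _, acc => acc.reverse
  | line :: rest, k, acc =>
    if PySem.Str.isIn "SAR" line && decide (k < 3) then pvALoop date_str rest (k + 1) acc
    else if 3 ≤ k then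
      if PySem.Str.isIn date_str line then (line :: acc).reverse
      else pvALoop date_str rest k (line :: acc)
    else pvALoop date_str rest k acc

def extract_rtl_transaction_description (search_lines : List String) (amounts : List String) (date_str : String) : String :=
  pvJoinDesc (pvALoop date_str search_lines 0 [])

-- ===== PORT B =====
-- B's collect loop: append each line, stop (inclusive) at the first line containing date_str
def pvBCollect (date_str : String) : List String → List String
  | [] => []
  | line :: rest => line :: (if PySem.Str.isIn date_str line then [] else pvBCollect date_str rest)

-- [i for i, line in enumerate(search_lines) if 'SAR' in line]
def pvSarIdx (search_lines : List String) (start : Int) : List Int :=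
  ((PySem.List.enumerate search_lines start).filter (fun p => PySem.Str.isIn "SAR" p.2)).map (·.1)

def extract_rtl_transaction_description_alt (search_lines : List String) (amounts : List String) (date_str : String) : String :=
  let sar_indices := pvSarIdx search_lines 0
  if sar_indices.length < 3 then ""
  else
    -- search_lines[sar_indices[2] + 1:] — the index is a nonnegative enumerate index, so the
    -- Python slice is exactly List.drop of it plus one
    pvJoinDesc (pvBCollect date_str (search_lines.drop ((sar_indices[2]!).toNat + 1)))

-- ===== PRECONDITION & SPEC =====
def Spec_extract_rtl_transaction_description (search_lines : List String) (amounts : List String) (date_str : String) (out : String) : Prop := out = extract_rtl_transaction_description_alt search_lines amounts date_str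
instance (search_lines : List String) (amounts : List String) (date_str : String) (out : String) : Decidable (Spec_extract_rtl_transaction_description search_lines amounts date_str out) := by unfold Spec_extract_rtl_transaction_description; infer_instance

-- ===== CLAIM (what is proved, stated in full; the proofs are below) =====
def Claim_equal_extract_rtl_transaction_description : Prop := ∀ (search_lines : List String) (amounts : List String) (date_str : String), Dom_extract_rtl_transaction_description search_lines amounts date_str → Spec_extract_rtl_transaction_description search_lines amounts date_str (extract_rtl_transaction_description search_lines amounts date_str)

-- ===== LEMMAS AND PROOFS =====

-- unfolding pvSarIdx on a cons
theorem pvSarIdx_cons (l : String) (rest : List String) (s : Int) :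
    pvSarIdx (l :: rest) s =
      if PySem.Str.isIn "SAR" l then s :: pvSarIdx rest (s + 1) else pvSarIdx rest (s + 1) := by
  simp only [pvSarIdx, PySem.List.enumerate_cons, List.filter_cons]
  split_ifs <;> simp_all

theorem pvSarIdx_lb (lines : List String) (s : Int) :
    ∀ i ∈ pvSarIdx lines s, s ≤ i := by
  induction lines generalizing s with
  | nil => simp [pvSarIdx]
  | cons l rest ih =>
    intro i hi
    rw [pvSarIdx_cons] at hi
    split_ifs at hi with h
    · rcases List.mem_cons.mp hi with rfl | h2
      · omega
      · have := ih (s + 1) i h2; omega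
    · have := ih (s + 1) i hi; omega

-- phase 2: once three 'SAR' lines have been skipped, A's loop collects exactly like B's
theorem pvALoop_phase2 (d : String) (lines : List String) (acc : List String) :
    pvALoop d lines 3 acc = acc.reverse ++ pvBCollect d lines := by
  induction lines generalizing acc with
  | nil => simp [pvALoop, pvBCollect]
  | cons l rest ih =>
    simp only [pvALoop, pvBCollect]
    cases hd : PySem.Str.isIn d l <;> simp [hd, ih]

-- main invariant: A's loop in phase 1 equals B's split-point form
theorem pvALoop_main (d : String) (lines : List String) (s : Int) (k : Nat) (hk : k < 3) :
    pvALoop d lines k [] =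
      match (pvSarIdx lines s)[2 - k]? with
      | none => []
      | some i => pvBCollect d (lines.drop ((i - s).toNat + 1)) := by
  induction lines generalizing s k with
  | nil => simp [pvALoop, pvSarIdx, PySem.List.enumerate_nil]
  | cons l rest ih =>
    rw [pvSarIdx_cons]
    cases hs : PySem.Str.isIn "SAR" l with
    | true =>
      rw [if_pos rfl]
      simp only [pvALoop, hs, Bool.true_and, decide_eq_true_eq, if_pos hk]
      by_cases hk2 : k = 2
      · subst hk2
        rw [pvALoop_phase2]
        simp
      · have hk' : k + 1 < 3 := by omega
        rw [ih (s + 1) (k + 1) hk']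
        have hidx : (2 - k) = (2 - (k + 1)) + 1 := by omega
        rw [hidx, List.getElem?_cons_succ]
        cases h : (pvSarIdx rest (s + 1))[2 - (k + 1)]? with
        | none => rfl
        | some i =>
          have hle : s + 1 ≤ i := pvSarIdx_lb rest (s + 1) i (List.mem_of_getElem? h)
          have hdrop : (l :: rest).drop ((i - s).toNat + 1)
              = rest.drop ((i - (s + 1)).toNat + 1) := by
            rw [List.drop_succ_cons]
            congr 1
            omega
          simp [hdrop]
    | false =>
      rw [if_neg (by simp)]
      have hk3 : ¬ (3 ≤ k) := by omega
      simp only [pvALoop, hs, Bool.false_and, Bool.false_eq_true, if_false, if_neg hk3]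
      rw [ih (s + 1) k hk]
      cases h : (pvSarIdx rest (s + 1))[2 - k]? with
      | none => rfl
      | some i =>
        have hle : s + 1 ≤ i := pvSarIdx_lb rest (s + 1) i (List.mem_of_getElem? h)
        have hdrop : (l :: rest).drop ((i - s).toNat + 1)
            = rest.drop ((i - (s + 1)).toNat + 1) := by
          rw [List.drop_succ_cons]
          congr 1
          omega
        simp [hdrop]

-- ===== VERDICT (by name: the statement is the Claim_ definition above) =====
theorem extract_rtl_transaction_description_spec : Claim_equal_extract_rtl_transaction_description := by
  intro search_lines amounts date_str _
  unfold Spec_extract_rtl_transaction_description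
  unfold extract_rtl_transaction_description extract_rtl_transaction_description_alt
  rw [pvALoop_main date_str search_lines 0 0 (by omega)]
  simp only
  by_cases hlen : (pvSarIdx search_lines 0).length < 3
  · have hnone : (pvSarIdx search_lines 0)[2]? = none := by
      rw [List.getElem?_eq_none_iff]; omega
    rw [if_pos hlen]
    simp [hnone, pvJoinDesc, PySem.Str.join]
  · have hlt : 2 < (pvSarIdx search_lines 0).length := by omega
    have hsome : (pvSarIdx search_lines 0)[2]? = some ((pvSarIdx search_lines 0)[2]!) := by
      rw [List.getElem!_eq_getElem?_getD, List.getElem?_eq_getElem hlt]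
      simp
    rw [if_neg hlen, hsome]
    simp
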